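-- pv_equiv track=rewrite | github.com/pypi-data/pypi-mirror-337 | packages/mur/mur-0.0.8-py3-none-any.whl/mur/commands/list_artifacts.py | _group_tools_by_source
-- ===== SOURCE A (Python) =====
-- from typing import Optional, TypedDict
--
-- class ToolInfo(TypedDict):
--     """TypedDict for tool information."""
--
--     name: str
--     version: str
--     description: str
--
-- def _group_tools_by_source(tools_dict: dict) -> dict[str, list[ToolInfo]]:
--     """Group tools by their source.
--
--     Args:
--         tools_dict: Dictionary of tools
--
--     Returns:
--         Dictionary mapping source to list of tool info
--     """
--     source_groups: dict[str, list[ToolInfo]] = {}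
--
--     for tool_name, tool_info in tools_dict.items():
--         source = tool_info.get('source', '').split(':')[0]
--
--         if source not in source_groups:
--             source_groups[source] = []
--
--         # Extract version from wheel path if available
--         version = 'Unknown'
--         wheel_path = tool_info.get('wheel', '')
--         if wheel_path:
--             wheel_filename = wheel_path.split('/')[-1]
--             version_part = wheel_filename.split('-')
--             if len(version_part) > 1:
--                 version = version_part[1]
--
--         source_groups[source].append(
--             {'name': tool_name, 'version': version, 'description': tool_info.get('description', '')}
--         )
--
--     return source_groups
-- ===== SOURCE B (Python) =====
-- def _source_of(info):
--     return info.get('source', '').split(':')[0]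
--
--
-- def _tool_info(name, info):
--     wheel_path = info.get('wheel', '')
--     version = 'Unknown'
--     if wheel_path:
--         parts = wheel_path.split('/')[-1].split('-')
--         if len(parts) > 1:
--             version = parts[1]
--     return {'name': name, 'version': version, 'description': info.get('description', '')}
--
--
-- def _group_tools_by_source(tools_dict: dict):
--     pairs = [(_source_of(info), _tool_info(name, info)) for name, info in tools_dict.items()]
--     return {s: [ti for t, ti in pairs if t == s] for s in dict.fromkeys(t for t, _ in pairs)}
-- ===== Notes on version B (the rewrite author's own statement) =====
-- stated objective: alternative
-- what changed: Replaces the imperative loop that mutates a grouping dict (conditional key creation + append) with a declarative two-phase form: materialize (source, tool_info) pairs once, then build the result as a dict comprehension over the first-occurrence-deduped sources, each group a filter of the pairs list.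
import Mathlib
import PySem

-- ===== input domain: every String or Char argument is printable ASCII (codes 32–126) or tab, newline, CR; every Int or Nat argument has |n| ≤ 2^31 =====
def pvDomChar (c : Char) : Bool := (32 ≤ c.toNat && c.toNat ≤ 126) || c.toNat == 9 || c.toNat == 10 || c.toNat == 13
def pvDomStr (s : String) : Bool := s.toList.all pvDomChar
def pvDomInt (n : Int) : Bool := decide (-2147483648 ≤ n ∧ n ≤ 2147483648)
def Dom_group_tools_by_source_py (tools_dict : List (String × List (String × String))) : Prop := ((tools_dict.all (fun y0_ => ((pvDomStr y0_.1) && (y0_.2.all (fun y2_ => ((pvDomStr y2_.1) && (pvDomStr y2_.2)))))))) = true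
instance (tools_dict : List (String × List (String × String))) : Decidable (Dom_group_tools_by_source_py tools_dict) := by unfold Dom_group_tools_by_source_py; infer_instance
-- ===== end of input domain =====

-- B replaces A's dict-mutating loop with a declarative two-phase form (pairs list, then dedup + filter per source); same values, alternative structure, not faster.

-- ===== PORT A =====
def group_tools_by_source_py (tools_dict : List (String × List (String × String))) : List (String × List (List (String × String))) :=
  (tools_dict.foldl (fun source_groups p =>
      -- source = tool_info.get('source', '').split(':')[0]: sep ":" is nonempty so split? is some, and the result is never empty so [0] is the head
      let source := ((PySem.Str.split? ((PySem.Dict.mk p.2).getD "source" "") ":").getD []).headD ""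
      let source_groups := if source_groups.contains source then source_groups
                           else source_groups.insert source ([] : List (List (String × String)))
      let version := "Unknown"
      let wheel_path := (PySem.Dict.mk p.2).getD "wheel" ""
      let version := if wheel_path ≠ "" then
          -- wheel_path.split('/')[-1]: split never empty, so [-1] is the last element
          let version_part := (PySem.Str.split? (((PySem.Str.split? wheel_path "/").getD []).getLastD "") "-").getD []
          if version_part.length > 1 then version_part.getD 1 "" else version
        else version
      -- source_groups[source].append(…): the key is present, so this is modify with append
      source_groups.modify source [] (fun l =>
        l ++ [[("name", p.1), ("version", version), ("description", (PySem.Dict.mk p.2).getD "description" "")]]))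
    PySem.Dict.empty).items

-- ===== PORT B =====
def pvSourceOf (info : List (String × String)) : String :=
  -- info.get('source', '').split(':')[0]  (split with a nonempty sep is never empty)
  ((PySem.Str.split? ((PySem.Dict.mk info).getD "source" "") ":").getD []).headD ""

def pvToolInfo (name : String) (info : List (String × String)) : List (String × String) :=
  let wheel_path := (PySem.Dict.mk info).getD "wheel" ""
  let version := "Unknown"
  let version := if wheel_path ≠ "" then
      -- wheel_path.split('/')[-1]: split never empty, so [-1] is the last element
      let parts := (PySem.Str.split? (((PySem.Str.split? wheel_path "/").getD []).getLastD "") "-").getD []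
      if parts.length > 1 then parts.getD 1 "" else version
    else version
  [("name", name), ("version", version), ("description", (PySem.Dict.mk info).getD "description" "")]

def group_tools_by_source_py_alt (tools_dict : List (String × List (String × String))) : List (String × List (List (String × String))) :=
  let pairs := tools_dict.map (fun p => (pvSourceOf p.2, pvToolInfo p.1 p.2))
  (PySem.List.dedup (pairs.map Prod.fst)).map (fun s =>
    (s, (pairs.filter (fun q => q.1 == s)).map Prod.snd))

-- ===== PRECONDITION & SPEC =====
def Spec_group_tools_by_source_py (tools_dict : List (String × List (String × String))) (out : List (String × List (List (String × String)))) : Prop := out = group_tools_by_source_py_alt tools_dict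
instance (tools_dict : List (String × List (String × String))) (out : List (String × List (List (String × String)))) : Decidable (Spec_group_tools_by_source_py tools_dict out) := by unfold Spec_group_tools_by_source_py; infer_instance

-- ===== CLAIM (what is proved, stated in full; the proofs are below) =====
def Claim_equal_group_tools_by_source_py : Prop := ∀ (tools_dict : List (String × List (String × String))), Dom_group_tools_by_source_py tools_dict → Spec_group_tools_by_source_py tools_dict (group_tools_by_source_py tools_dict)

-- ===== LEMMAS AND PROOFS =====

-- A's "if absent, create empty list, then append" collapses to a bare modify-with-append.
theorem pv_cond_insert_modify {nu : Type} (d : PySem.Dict String (List nu)) (k : String)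
    (f : List nu → List nu) :
    (if d.contains k then d else d.insert k ([] : List nu)).modify k [] f = d.modify k [] f := by
  by_cases h : d.contains k
  · simp [h]
  · simp only [eq_false_of_ne_true h, Bool.false_eq_true, if_false]
    rw [PySem.Dict.modify, PySem.Dict.modify, PySem.Dict.getD_insert_self,
      PySem.Dict.insert_insert_self, PySem.Dict.getD_of_not_contains (h := eq_false_of_ne_true h)]

-- ===== VERDICT (by name: the statement is the Claim_ definition above) =====
theorem group_tools_by_source_py_spec : Claim_equal_group_tools_by_source_py := by
  intro td _
  unfold Spec_group_tools_by_source_py group_tools_by_source_py group_tools_by_source_py_alt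
  -- fold A's step into the canonical grouping step over the materialized pairs
  have h1 : td.foldl (fun source_groups p =>
      let source := ((PySem.Str.split? ((PySem.Dict.mk p.2).getD "source" "") ":").getD []).headD ""
      let source_groups := if source_groups.contains source then source_groups
                           else source_groups.insert source ([] : List (List (String × String)))
      let version := "Unknown"
      let wheel_path := (PySem.Dict.mk p.2).getD "wheel" ""
      let version := if wheel_path ≠ "" then
          let version_part := (PySem.Str.split? (((PySem.Str.split? wheel_path "/").getD []).getLastD "") "-").getD []
          if version_part.length > 1 then version_part.getD 1 "" else version
        else version
      source_groups.modify source [] (fun l =>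
        l ++ [[("name", p.1), ("version", version), ("description", (PySem.Dict.mk p.2).getD "description" "")]]))
      PySem.Dict.empty
      = (td.map (fun p => (pvSourceOf p.2, pvToolInfo p.1 p.2))).foldl
          (fun d q => d.modify q.1 [] (fun l => l ++ [q.2])) PySem.Dict.empty := by
    rw [List.foldl_map]
    exact PySem.List.foldl_congr_mem td _ _ _ (fun d p _ =>
      pv_cond_insert_modify d (pvSourceOf p.2) (fun l => l ++ [pvToolInfo p.1 p.2]))
  rw [h1]
  set ps := td.map (fun p => (pvSourceOf p.2, pvToolInfo p.1 p.2)) with hps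
  have hnd : (ps.foldl (fun d q => d.modify q.1 [] (fun l => l ++ [q.2])) PySem.Dict.empty).keys.Nodup :=
    PySem.Dict.nodup_keys_foldl_modify_key ps Prod.fst [] (fun _ q => (· ++ [q.2])) PySem.Dict.empty
      (by simp [PySem.Dict.keys_empty])
  rw [PySem.Dict.items_eq_map_keys _ hnd []]
  rw [PySem.Dict.keys_foldl_modify_key ps Prod.fst [] (fun _ q => (· ++ [q.2]))]
  simp only [PySem.List.dedup_eq_ofList, PySem.Dict.keys_empty]
  have hupd : PySem.Set.update ([] : PySem.Set String) (ps.map Prod.fst)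
      = PySem.Set.ofList (ps.map Prod.fst) := rfl
  rw [hupd]
  apply List.map_congr_left
  intro k _
  rw [PySem.Dict.getD_foldl_modify_append ps PySem.Dict.empty k]
  simp [PySem.Dict.getD_empty]
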